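/-
  What the stepping tactic rewrites with, besides the clause rules of `Sem.wpUser`:

      the user state      sub-register reads and writes in terms of `reg` / `setReg` (`State.part_eq` …), projections of
                          the setters the model does not state (`rip_setMxcsr` …), and THE NORMAL FORM of a nest of setters
                          (simp set `u_norm`):
                              ((((u.setReg r₁ x₁) … .setReg rₖ xₖ).setMem μ).setFlags f).setRip a      r₁ < … < rₖ
                          — at most 16 + 3 layers however long a walk; all rules proved by `cases`, none `rfl`-tagged
      what the decoder    `Dec.gpr n`, `Dec.cond n`, `Width.ofBits`, `Word.sext` of a literal (`reduceWordSext`)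
      hands over
      observations        the list of observation functions the user-mode integer path applies to the machine, each with
                          the fact of X86/Derived/User/Abs.lean that evaluates it (`Abs.in64` …), and the facts the model
                          does not state (`Abs.obs_rip`, `Abs.obs_flags`, `Abs.obs_mxcsr`, `Abs.obs_readVec`,
                          `Abs.endbranchEnabled`)
      register values     THE NORMAL FORM of a register's content: 64-bit arithmetic in word vocabulary, narrower values
                          as `Word.ofBV (v : BitVec 32)`, the round trips between the two (`Word.part_w32_ofBV32` …)
      memory              reading back, at the same address and size, what was just stored (`Mem.readLE8_writeLE8` …)
-/
import UserX.WpSimp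
import X86.Derived.Typed.Part
import X86.Derived.Typed.Cond
import X86.Derived.Word.Lemmas
import X86.Derived.Sem.Coherent
import X86.Derived.Sem.WordPartLemmas
import Word.AddrNorm
import Word.Lit

namespace X86
namespace User
namespace State

/-! ### Sub-register views in terms of `reg` / `setReg` -/

/-- AL / AX / EAX / RAX of a state is the part of the register. Low priority: a hypothesis `u.part w r = v` of the
context is tried first. -/
@[u_step low] theorem part_eq (u : State) (w : Width) (r : Reg) : u.part w r = Word.part w (u.reg r) := id rfl

/-- AH / CH / DH / BH of a state. -/
@[u_step low] theorem hi8_eq (u : State) (r : Reg) : u.hi8 r = Word.hi8 (u.reg r) := id rfl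

/-- The architectural write of a `w`-bit value is a write of the whole register. -/
@[u_step] theorem writePart_eq (u : State) (w : Width) (r : Reg) (x : BitVec w.bits) :
    u.writePart w r x = u.setReg r (Word.writePart w (u.reg r) x) := id rfl

/-- A write of AH / CH / DH / BH is a write of the whole register. -/
@[u_step] theorem writeHi8_eq (u : State) (r : Reg) (x : BitVec 8) :
    u.writeHi8 r x = u.setReg r (Word.writeHi8 (u.reg r) x) := id rfl

/-- A typed part read through a setter that does not touch the registers. -/
@[u_step] theorem part_setRip (u : State) (w : Width) (r : Reg) (x : Word) : (u.setRip x).part w r = u.part w r := id rfl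
@[u_step] theorem part_setFlags (u : State) (w : Width) (r : Reg) (f : Flags) : (u.setFlags f).part w r = u.part w r :=
  id rfl
@[u_step] theorem part_setMem (u : State) (w : Width) (r : Reg) (μ : Mem) : (u.setMem μ).part w r = u.part w r := id rfl
@[u_step] theorem part_setMxcsr (u : State) (w : Width) (r : Reg) (x : Word) : (u.setMxcsr x).part w r = u.part w r :=
  id rfl

/-- A typed part read through a register write: the part of the written word, or the part of the state below. -/
@[u_step] theorem part_setReg (u : State) (w : Width) (r r' : Reg) (x : Word) :
    (u.setReg r x).part w r' = if r' = r then Word.part w x else u.part w r' := by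
  unfold part
  rw [reg_setReg]
  split <;> rfl

@[u_step] theorem hi8_setRip (u : State) (r : Reg) (x : Word) : (u.setRip x).hi8 r = u.hi8 r := id rfl
@[u_step] theorem hi8_setFlags (u : State) (r : Reg) (f : Flags) : (u.setFlags f).hi8 r = u.hi8 r := id rfl
@[u_step] theorem hi8_setMem (u : State) (r : Reg) (μ : Mem) : (u.setMem μ).hi8 r = u.hi8 r := id rfl
@[u_step] theorem hi8_setReg (u : State) (r r' : Reg) (x : Word) :
    (u.setReg r x).hi8 r' = if r' = r then Word.hi8 x else u.hi8 r' := by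
  unfold hi8
  rw [reg_setReg]
  split <;> rfl

/-! ### Projections the model does not state (MXCSR and the vector registers against the integer setters) -/

@[u_step] theorem reg_setMxcsr (u : State) (r : Reg) (x : Word) : (u.setMxcsr x).reg r = u.reg r := id rfl
@[u_step] theorem rip_setMxcsr (u : State) (x : Word) : (u.setMxcsr x).rip = u.rip := id rfl
@[u_step] theorem flags_setMxcsr (u : State) (x : Word) : (u.setMxcsr x).flags = u.flags := id rfl
@[u_step] theorem mem_setMxcsr (u : State) (x : Word) : (u.setMxcsr x).mem = u.mem := id rfl
@[u_step] theorem mxcsr_setMxcsr (u : State) (x : Word) : (u.setMxcsr x).mxcsr = x := id rfl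
@[u_step] theorem mxcsr_setReg (u : State) (r : Reg) (x : Word) : (u.setReg r x).mxcsr = u.mxcsr := id rfl
@[u_step] theorem mxcsr_setRip (u : State) (x : Word) : (u.setRip x).mxcsr = u.mxcsr := id rfl
@[u_step] theorem mxcsr_setFlags (u : State) (f : Flags) : (u.setFlags f).mxcsr = u.mxcsr := id rfl
@[u_step] theorem mxcsr_setMem (u : State) (μ : Mem) : (u.setMem μ).mxcsr = u.mxcsr := id rfl
@[u_step] theorem zmm_setReg (u : State) (r : Reg) (x : Word) : (u.setReg r x).zmm = u.zmm := id rfl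
@[u_step] theorem zmm_setRip (u : State) (x : Word) : (u.setRip x).zmm = u.zmm := id rfl
@[u_step] theorem zmm_setFlags (u : State) (f : Flags) : (u.setFlags f).zmm = u.zmm := id rfl
@[u_step] theorem zmm_setMem (u : State) (μ : Mem) : (u.setMem μ).zmm = u.zmm := id rfl
@[u_step] theorem zmm_setMxcsr (u : State) (x : Word) : (u.setMxcsr x).zmm = u.zmm := id rfl

attribute [u_step] reg_setReg reg_setRip reg_setFlags reg_setMem rip_setReg rip_setRip rip_setFlags rip_setMem
  flags_setReg flags_setRip flags_setFlags flags_setMem mem_setReg mem_setRip mem_setFlags mem_setMem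

/-! ### The normal form of a nest of setters (`u_norm`)

Registers innermost in register-number order, then memory, then flags, RIP outermost. A setter of the same component
overwrites; setters of different components commute into that order. -/

@[u_norm] theorem setRip_setRip (u : State) (a b : Word) : (u.setRip a).setRip b = u.setRip b := by
  cases u
  rfl
@[u_norm] theorem setFlags_setFlags (u : State) (f g : Flags) : (u.setFlags f).setFlags g = u.setFlags g := by
  cases u
  rfl
@[u_norm] theorem setMem_setMem (u : State) (μ ν : Mem) : (u.setMem μ).setMem ν = u.setMem ν := by
  cases u
  rfl
@[u_norm] theorem setReg_setReg_same (u : State) (r : Reg) (x y : Word) : (u.setReg r x).setReg r y = u.setReg r y := by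
  cases u
  simp [setReg]

@[u_norm] theorem setRip_setReg (u : State) (a : Word) (r : Reg) (x : Word) :
    (u.setRip a).setReg r x = (u.setReg r x).setRip a := by
  cases u
  rfl
@[u_norm] theorem setRip_setFlags (u : State) (a : Word) (f : Flags) :
    (u.setRip a).setFlags f = (u.setFlags f).setRip a := by
  cases u
  rfl
@[u_norm] theorem setRip_setMem (u : State) (a : Word) (μ : Mem) : (u.setRip a).setMem μ = (u.setMem μ).setRip a := by
  cases u
  rfl
@[u_norm] theorem setFlags_setReg (u : State) (f : Flags) (r : Reg) (x : Word) :
    (u.setFlags f).setReg r x = (u.setReg r x).setFlags f := by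
  cases u
  rfl
@[u_norm] theorem setFlags_setMem (u : State) (f : Flags) (μ : Mem) :
    (u.setFlags f).setMem μ = (u.setMem μ).setFlags f := by
  cases u
  rfl
@[u_norm] theorem setMem_setReg (u : State) (μ : Mem) (r : Reg) (x : Word) :
    (u.setMem μ).setReg r x = (u.setReg r x).setMem μ := by
  cases u
  rfl

/-- RFLAGS after two flag results of which the second defines all six status flags: the first is forgotten, the flags term
stays ONE layer deep (`Flags.setStatus_of_writesAll`; its side condition is closed by the `…_writesAll` facts of the ALU
outcomes, which are in the stepping set). -/
@[u_norm] theorem setStatus_collapse (f : Flags) (a b : StatusFlags) (h : b.writesAll = true) :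
    (f.setStatus a).setStatus b = f.setStatus b :=
  Flags.setStatus_of_writesAll f a b h

/-- Writes of different registers commute. -/
theorem setReg_comm (u : State) (r s : Reg) (x y : Word) (h : r.idx.val ≠ s.idx.val) :
    (u.setReg r x).setReg s y = (u.setReg s y).setReg r x := by
  cases u with
  | mk regs rip flags zmm mxcsr mem =>
    simp only [setReg]
    congr 1
    apply Vector.ext
    intro i hi
    simp only [Vector.getElem_set]
    by_cases h1 : s.idx.val = i <;> by_cases h2 : r.idx.val = i <;> simp [h1, h2] <;> omega

end State
end User
end X86

namespace UserX
open Lean Meta Elab Command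

/-- The 120 instances `(u.setReg hi x).setReg lo y = (u.setReg lo y).setReg hi x` for `lo` before `hi` among the 16
general registers, tagged `u_norm`: the lower register number ends up inside. -/
elab "#u_gen_setReg_comm" : command => do
  let regs : List String :=
    ["rax", "rcx", "rdx", "rbx", "rsp", "rbp", "rsi", "rdi", "r8", "r9", "r10", "r11", "r12", "r13", "r14", "r15"]
  for i in [0:16] do
    for j in [i+1:16] do
      let lo := mkIdent (`X86.Reg ++ Name.mkSimple regs[i]!)
      let hi := mkIdent (`X86.Reg ++ Name.mkSimple regs[j]!)
      let nm := mkIdent (`X86.User.State ++ Name.mkSimple s!"setReg_comm_{regs[j]!}_{regs[i]!}")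
      elabCommand (← `(command|
        @[u_norm] theorem $nm (u : X86.User.State) (x y : X86.Word) :
            (u.setReg $hi x).setReg $lo y = (u.setReg $lo y).setReg $hi x :=
          X86.User.State.setReg_comm u $hi $lo x y (by decide)))

end UserX

#u_gen_setReg_comm

/-! ### What the decoder hands over -/

namespace X86
open Dec

@[u_step] theorem gpr_0 : gpr 0 = .rax := id rfl
@[u_step] theorem gpr_1 : gpr 1 = .rcx := id rfl
@[u_step] theorem gpr_2 : gpr 2 = .rdx := id rfl
@[u_step] theorem gpr_3 : gpr 3 = .rbx := id rfl
@[u_step] theorem gpr_4 : gpr 4 = .rsp := id rfl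
@[u_step] theorem gpr_5 : gpr 5 = .rbp := id rfl
@[u_step] theorem gpr_6 : gpr 6 = .rsi := id rfl
@[u_step] theorem gpr_7 : gpr 7 = .rdi := id rfl
@[u_step] theorem gpr_8 : gpr 8 = .r8 := id rfl
@[u_step] theorem gpr_9 : gpr 9 = .r9 := id rfl
@[u_step] theorem gpr_10 : gpr 10 = .r10 := id rfl
@[u_step] theorem gpr_11 : gpr 11 = .r11 := id rfl
@[u_step] theorem gpr_12 : gpr 12 = .r12 := id rfl
@[u_step] theorem gpr_13 : gpr 13 = .r13 := id rfl
@[u_step] theorem gpr_14 : gpr 14 = .r14 := id rfl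
@[u_step] theorem gpr_15 : gpr 15 = .r15 := id rfl

@[u_step] theorem cond_0 : cond 0 = .o := id rfl
@[u_step] theorem cond_1 : cond 1 = .no := id rfl
@[u_step] theorem cond_2 : cond 2 = .b := id rfl
@[u_step] theorem cond_3 : cond 3 = .ae := id rfl
@[u_step] theorem cond_4 : cond 4 = .e := id rfl
@[u_step] theorem cond_5 : cond 5 = .ne := id rfl
@[u_step] theorem cond_6 : cond 6 = .be := id rfl
@[u_step] theorem cond_7 : cond 7 = .a := id rfl
@[u_step] theorem cond_8 : cond 8 = .s := id rfl
@[u_step] theorem cond_9 : cond 9 = .ns := id rfl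
@[u_step] theorem cond_10 : cond 10 = .p := id rfl
@[u_step] theorem cond_11 : cond 11 = .np := id rfl
@[u_step] theorem cond_12 : cond 12 = .l := id rfl
@[u_step] theorem cond_13 : cond 13 = .ge := id rfl
@[u_step] theorem cond_14 : cond 14 = .le := id rfl
@[u_step] theorem cond_15 : cond 15 = .g := id rfl

/-- The width of a size in bits. Stated by the bare `rfl` ON PURPOSE: the width sits where types depend on it
(`RegRef.gprT (Width.ofBits 64) r : RegRef (BitVec (Width.ofBits 64).bits)`), where `simp` rewrites definitionally only.
A closed evaluation: nothing for the kernel to unfold into. -/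
@[u_step] theorem ofBits_8 : Width.ofBits 8 = .w8 := rfl
@[u_step] theorem ofBits_16 : Width.ofBits 16 = .w16 := rfl
@[u_step] theorem ofBits_32 : Width.ofBits 32 = .w32 := rfl
@[u_step] theorem ofBits_64 : Width.ofBits 64 = .w64 := rfl

/-! `Width.bits .w32` is reduced by unfolding `Width.bits` (it is `@[reducible]`: a rewrite rule with `Width.bits .w32`
on its left-hand side is indexed under `32` and never fires). -/

@[u_step] theorem width_bytes_8 : Width.bytes .w8 = 1 := id rfl
@[u_step] theorem width_bytes_16 : Width.bytes .w16 = 2 := id rfl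
@[u_step] theorem width_bytes_32 : Width.bytes .w32 = 4 := id rfl
@[u_step] theorem width_bytes_64 : Width.bytes .w64 = 8 := id rfl

/-- `PlainAttr` of attributes that demand no alignment, at any offset, from the four facts about a closed attribute record
(each by evaluation). `a.locked` is not asked: a LOCKed access is a plain one in the user relation. -/
theorem plainAttr_of (a : AccessAttr) {off : Word} (h1 : a.align = 1) (h2 : a.asUser = none) (h3 : a.shadowStack = false)
    (h4 : a.hint = .normal) : User.PlainAttr a off :=
  User.PlainAttr.of_unaligned h1 h2 h3 h4

end X86

/-! ### The sign-extension evaluator -/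

namespace UserX
open Lean Meta Simp

/-- Evaluate `Word.sext` on literals; the result carries a `decide` proof. -/
simproc_decl reduceWordSext (X86.Word.sext _ _) := fun e => do
  unless e.isAppOfArity ``X86.Word.sext 2 do
    return .continue
  let some (w, _) ← getOfNatValue? e.appFn!.appArg! ``UInt64 | return .continue
  let some b ← Nat.fromExpr? e.appArg! | return .continue
  let r := toExpr (X86.Word.sext (UInt64.ofNat w) b)
  let prf ← mkDecideProof (← mkEq e r)
  return .done { expr := r, proof? := some prf }

/-- The bits of a literal word: `UInt64.toBitVec 20` to `20#64`, with a `decide` proof. -/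
simproc_decl reduceToBitVecLit (UInt64.toBitVec _) := fun e => do
  unless e.isAppOfArity ``UInt64.toBitVec 1 do
    return .continue
  let some n ← Word.Lit.fromExpr64 e.appArg! | return .continue
  let r := toExpr (BitVec.ofNat 64 n.toNat)
  let prf ← mkDecideProof (← mkEq e r)
  return .done { expr := r, proof? := some prf }

end UserX

/-! ### Observations

`Sem.env f` / `Sem.observe f` hand the machine to a pure function; the flat reading quantifies over every machine `m` in
the relation (`∀ m, Abs L m u → …`). The stepping tactic introduces `m` and `hm : Abs L m u` and rewrites with the
facts of `hm`. THE LIST of what the user-mode integer path observes (X86/Sem/Lib.lean, X86/Sem/Lib/Branch.lean,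
X86/Sem/Typed.lean), and the fact that evaluates it:

      m.in64                                   Abs.in64               in64, memReq, jumpTo, nearCall
      m.mode                                   Abs.mode               mode
      m.cpl                                    Abs.cpl                shstkCallNear / shstkRetNear (as the argument of shadowStackEnabled)
      m.stackAddressBits                       Abs.stackAddressBits   stackPtr, setStackPtr, pushN, popN, pushV, popV
      e.operandBits m d                        Abs.operandBits        operandBits (PUSH / POP / CBW / CWD / MOVSXD …)
      e.addressBits m                          Abs.addressBits        addressBits (string instructions, LEA); side condition e.addrsize = false
      e.nearBranchBits m                       Abs.nearBranchBits     nearJmpRel, nearJcc, nearCall, nearRet, nearJmpInd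
      m.isCanonical a                          Abs.isCanonical        jumpTo; side condition a < 40000000H (a visible side goal when it does not evaluate)
      m.mpxEnabled                             Abs.mpxEnabled         bndInitOnBranch (the conjunction `m.mpxEnabled && …` then evaluates to false)
      m.shadowStackEnabled c                   Abs.shadowStackEnabled shstkCallNear, shstkRetNear
      m.endbranchEnabledAndNotSuppressed c     Abs.endbranch          armTrackerNearIndirect (call / jmp through a register)
      m.longModeActive                         Abs.longModeActive     (far transfers; not on the integer path of the image)
      m.defaultOperandBits / AddressBits       Abs.defaultOperandBits / Abs.defaultAddressBits
      m.rip                                    Abs.obs_rip (here)     nearCall, nearCallRel read the return address out of the snapshot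
      m.reg r                                  Abs.reg                (no integer instruction of the image; string instructions do)
      m.flags                                  Abs.obs_flags (here)
      m.mxcsr                                  Abs.obs_mxcsr (here)   the SSE path (M4)
      m.cr0 / m.cr4 / m.efer                   Abs.cr0 / cr4 / efer   the SSE path (`requireSSE`: CR0.EM / TS, CR4.OSFXSR)
      m.cfg.has f, m.cfg.…                     NOT pinned by `User.Core` — `requireFeature`, `X86.config` (BSF / BSR / DIV read
                                               `cfg` fields): see the report; `(← X86.config).callNearPushBeforeLimit` in nearCall
                                               is guarded by `!m.in64` and never evaluated. -/

namespace X86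
namespace User
namespace Abs
variable {L : Layout} {m : Machine} {u : State}

/-- RIP read out of a snapshot of the machine is the user state's. -/
theorem obs_rip (h : Abs L m u) : m.rip = u.rip := h.rip

/-- RFLAGS read out of a snapshot of the machine is the user state's. -/
theorem obs_flags (h : Abs L m u) : m.flags = u.flags := h.flags

/-- MXCSR read out of a snapshot of the machine is the user state's. -/
theorem obs_mxcsr (h : Abs L m u) : m.mxcsr = u.mxcsr := h.mxcsr

/-- A vector register read out of a snapshot of the machine is the user state's (the model's `Abs.readVec`). -/
theorem obs_readVec (h : Abs L m u) (w : VWidth) (r : VReg) : m.readVec w r = u.readVec w r :=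
  h.readVec w r

/- `Abs.endbranchEnabled` (CET is off: ENDBR32 / ENDBR64 find the indirect-branch tracker disabled) is the model's
(X86/Derived/User/Abs.lean). -/

/-- The side condition of a branch target: a target below 1 GB is canonical (`Abs.isCanonical` with the conclusion
turned round, so that `refine` leaves the inequality). -/
theorem isCanonical_eq_true (h : Abs L m u) (a : Word) (ha : a < 0x40000000) : m.isCanonical a = true :=
  h.isCanonical a ha

end Abs

/-! ### `FlagsOK` along a nest of flag writes -/

/- `User.FlagsOK.set_other` (a write of a flag other than IF, TF, RF, VM keeps `FlagsOK`: CLD / STD write DF) is the model's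
(X86/Derived/User/Flags.lean). -/

/-- A one-element `update` is a `set`. -/
theorem Flags.update_one (f : Flags) (k : Flag) (b : Bool) : f.update [(k, b)] = f.set k b := rfl

/-- The condition under which a range lies in the user region, with the request's fields apart: what a load leaves. -/
theorem Layout.readable_of {L : Layout} {seg : Seg} {off : Word} {k : Nat} {attr : AccessAttr} {via : MemVia}
    (hv : via = .logical) (ha : PlainAttr attr off) (hk : 0 < k) (hr : L.Has off k) :
    L.Readable { seg := seg, off := off, n := k, attr := attr, via := via } :=
  ⟨hv, ha, hk, hr⟩

/-- The same for a store. -/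
theorem Layout.writable_of {L : Layout} {seg : Seg} {off : Word} {k : Nat} {attr : AccessAttr} {via : MemVia}
    (hv : via = .logical) (ha : PlainAttr attr off) (hk : 0 < k) (hr : L.Has off k) :
    L.Writable { seg := seg, off := off, n := k, attr := attr, via := via } :=
  ⟨hv, ha, hk, hr⟩

end User

/-! ### Register values: a register is a `Word`, an operand a `BitVec w.bits`

THE NORMAL FORM OF A REGISTER'S CONTENT. A register holds a `Word` (`UInt64`); the typed operand layer reads and writes
`BitVec w.bits`. The rules below keep 64-bit arithmetic in WORD vocabulary (`rsp - 0x18`, `rdx + rax * 4`: what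
`addr_norm` and the memory side conditions are about) and everything narrower in `BitVec` vocabulary, embedded by
`Word.ofBV` (zero extension):

      64-bit write    Word.ofBV (v : BitVec 64), pushed through `+ - * &&& ||| ^^^ ~~~ -` down to `x.toBitVec` (= `x`) and
                      literals:  add rsp, 8  leaves  rsp + 8
      32-bit write    Word.ofBV (v : BitVec 32)          — the old value plays no part
      8 / 16-bit      Word.writePart .w8 old v           — the old value stays
      64-bit read     x.toBitVec;  of `Word.ofBV (v : BitVec 32)`: `v.setWidth 64`
      32-bit read     Word.part .w32 x;  of `Word.ofBV (v : BitVec 32)`: `v`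
-/

namespace Word

/-- A 64-bit write replaces the register. -/
@[u_step] theorem writePart_w64 (old : Word) (v : BitVec 64) : writePart .w64 old v = Word.ofBV v := by
  unfold writePart Word.ofBV
  rw [BitVec.setWidth_eq]

/-- A 32-bit write zero-extends: the old value plays no part. -/
@[u_step] theorem writePart_w32 (old : Word) (v : BitVec 32) : writePart .w32 old v = Word.ofBV v := id rfl

/-- RAX as a 64-bit value. -/
@[u_step] theorem part_w64 (x : Word) : part .w64 x = x.toBitVec := by
  unfold part
  exact BitVec.setWidth_eq _

/-- The bits of an embedded value: the value zero-extended. -/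
@[u_step] theorem toBitVec_ofBV {n : Nat} (v : BitVec n) : (Word.ofBV v).toBitVec = v.setWidth 64 := id rfl

/-- EAX of a register that was written at 32 bits. -/
@[u_step] theorem part_w32_ofBV32 (v : BitVec 32) : part .w32 (Word.ofBV v) = v := by
  show (v.setWidth 64).setWidth 32 = v
  rw [BitVec.setWidth_setWidth_of_le v (by decide), BitVec.setWidth_eq]

/-- EAX of a register that was written at 64 bits. -/
@[u_step] theorem part_w32_ofBV64 (v : BitVec 64) : part .w32 (Word.ofBV v) = v.setWidth 32 := by
  show (v.setWidth 64).setWidth 32 = v.setWidth 32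
  rw [BitVec.setWidth_eq]

/-- AX of a register that was written at 32 bits. -/
@[u_step] theorem part_w16_ofBV32 (v : BitVec 32) : part .w16 (Word.ofBV v) = v.setWidth 16 := by
  show (v.setWidth 64).setWidth 16 = v.setWidth 16
  rw [BitVec.setWidth_setWidth_of_le v (by decide)]

/-- AX of a register that was written at 64 bits. -/
@[u_step] theorem part_w16_ofBV64 (v : BitVec 64) : part .w16 (Word.ofBV v) = v.setWidth 16 := by
  show (v.setWidth 64).setWidth 16 = v.setWidth 16
  rw [BitVec.setWidth_eq]

/-- AL of a register that was written at 32 bits. -/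
@[u_step] theorem part_w8_ofBV32 (v : BitVec 32) : part .w8 (Word.ofBV v) = v.setWidth 8 := by
  show (v.setWidth 64).setWidth 8 = v.setWidth 8
  rw [BitVec.setWidth_setWidth_of_le v (by decide)]

/-- AL of a register that was written at 64 bits. -/
@[u_step] theorem part_w8_ofBV64 (v : BitVec 64) : part .w8 (Word.ofBV v) = v.setWidth 8 := by
  show (v.setWidth 64).setWidth 8 = v.setWidth 8
  rw [BitVec.setWidth_eq]

/-- AL after a write of AL, AX after a write of AX (the forms `simp` finds at a concrete width). -/
@[u_step] theorem part_w8_writePart_w8 (old : Word) (v : BitVec 8) : part .w8 (writePart .w8 old v) = v :=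
  part_writePart .w8 (by decide) old v
@[u_step] theorem part_w16_writePart_w16 (old : Word) (v : BitVec 16) : part .w16 (writePart .w16 old v) = v :=
  part_writePart .w16 (by decide) old v

/-- A word read at the full width is its bits (`setStackPtr`, LEAVE: a register written at the stack-address size). -/
@[u_step] theorem toBV_64 (x : Word) : x.toBV 64 = x.toBitVec := by
  unfold Word.toBV
  exact BitVec.setWidth_eq _

/-- The embedding of the bits of a word is the word. -/
@[u_step] theorem ofBV_toBitVec (x : Word) : Word.ofBV x.toBitVec = x := by
  unfold Word.ofBV
  rw [BitVec.setWidth_eq]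

/-- The embedding of a 64-bit numeral written `(k : BitVec 64)`. -/
@[u_step] theorem ofBV_lit64 (k : Nat) : Word.ofBV (no_index (OfNat.ofNat k) : BitVec 64) = UInt64.ofNat k := by
  unfold Word.ofBV
  rw [BitVec.setWidth_eq]
  rfl

/-- The embedding of a 64-bit number is the word of that number. -/
@[u_step] theorem ofBV_ofNat64 (k : Nat) : Word.ofBV (BitVec.ofNat 64 k) = UInt64.ofNat k := by
  unfold Word.ofBV
  rw [BitVec.setWidth_eq]
  rfl

/-- 64-bit arithmetic of the typed ALU is word arithmetic. -/
@[u_step] theorem ofBV_add (a b : BitVec 64) : Word.ofBV (a + b) = Word.ofBV a + Word.ofBV b := by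
  unfold Word.ofBV
  simp only [BitVec.setWidth_eq, UInt64.ofBitVec_add]
@[u_step] theorem ofBV_sub (a b : BitVec 64) : Word.ofBV (a - b) = Word.ofBV a - Word.ofBV b := by
  unfold Word.ofBV
  simp only [BitVec.setWidth_eq, UInt64.ofBitVec_sub]
@[u_step] theorem ofBV_mul (a b : BitVec 64) : Word.ofBV (a * b) = Word.ofBV a * Word.ofBV b := by
  unfold Word.ofBV
  simp only [BitVec.setWidth_eq, UInt64.ofBitVec_mul]
@[u_step] theorem ofBV_and (a b : BitVec 64) : Word.ofBV (a &&& b) = Word.ofBV a &&& Word.ofBV b := by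
  unfold Word.ofBV
  simp only [BitVec.setWidth_eq, UInt64.ofBitVec_and]
@[u_step] theorem ofBV_or (a b : BitVec 64) : Word.ofBV (a ||| b) = Word.ofBV a ||| Word.ofBV b := by
  unfold Word.ofBV
  simp only [BitVec.setWidth_eq, UInt64.ofBitVec_or]
@[u_step] theorem ofBV_xor (a b : BitVec 64) : Word.ofBV (a ^^^ b) = Word.ofBV a ^^^ Word.ofBV b := by
  unfold Word.ofBV
  simp only [BitVec.setWidth_eq, UInt64.ofBitVec_xor]
@[u_step] theorem ofBV_not (a : BitVec 64) : Word.ofBV (~~~a) = ~~~(Word.ofBV a) := by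
  unfold Word.ofBV
  simp only [BitVec.setWidth_eq, UInt64.ofBitVec_not]
@[u_step] theorem ofBV_neg (a : BitVec 64) : Word.ofBV (-a) = -(Word.ofBV a) := by
  unfold Word.ofBV
  simp only [BitVec.setWidth_eq, UInt64.ofBitVec_neg]

/-- A 64-bit left shift by a count below 64 is the word's. -/
@[u_step] theorem ofBV_shiftLeft (a : BitVec 64) (k : Nat) (hk : k < 64) :
    Word.ofBV (a <<< k) = Word.ofBV a <<< UInt64.ofNat k := by
  unfold Word.ofBV
  simp only [BitVec.setWidth_eq]
  exact UInt64.ofBitVec_shiftLeft a k hk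

/-- A 64-bit logical right shift by a count below 64 is the word's. -/
@[u_step] theorem ofBV_shiftRight (a : BitVec 64) (k : Nat) (hk : k < 64) :
    Word.ofBV (a >>> k) = Word.ofBV a >>> UInt64.ofNat k := by
  unfold Word.ofBV
  simp only [BitVec.setWidth_eq]
  exact UInt64.ofBitVec_shiftRight a k hk

end Word

/-! ### Reading back what the instruction before stored (push / pop, a spill and its reload)

Only the case of THE SAME address and size, where no side condition about the addresses is needed; a load from another
address through a store needs a disjointness fact (`Mem.readLE_writeLE_has`, X86/Derived/User/Frame.lean). -/

namespace User.Mem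

/-- A quadword read back. -/
@[u_step] theorem readLE8_writeLE8 (f : Mem) (a : Word) (x : UInt64) : (f.writeLE a 8 x.toNat).readLE a 8 = x.toNat := by
  rw [readLE_writeLE_same f a 8 x.toNat (by decide)]
  have := x.toNat_lt
  omega

/-- A doubleword read back. -/
@[u_step] theorem readLE4_writeLE4 (f : Mem) (a : Word) (v : BitVec 32) : (f.writeLE a 4 v.toNat).readLE a 4 = v.toNat := by
  rw [readLE_writeLE_same f a 4 v.toNat (by decide)]
  have := v.isLt
  omega

/-- A word read back. -/
@[u_step] theorem readLE2_writeLE2 (f : Mem) (a : Word) (v : BitVec 16) : (f.writeLE a 2 v.toNat).readLE a 2 = v.toNat := by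
  rw [readLE_writeLE_same f a 2 v.toNat (by decide)]
  have := v.isLt
  omega

/-- A byte read back. -/
@[u_step] theorem readLE1_writeLE1 (f : Mem) (a : Word) (v : BitVec 8) : (f.writeLE a 1 v.toNat).readLE a 1 = v.toNat := by
  rw [readLE_writeLE_same f a 1 v.toNat (by decide)]
  have := v.isLt
  omega

end User.Mem

/-! ### The bit string instructions' operand -/

/-- BT / BTS / BTR / BTC on a register: the operand itself, the offset modulo the width. Stated by the bare `rfl` ON
PURPOSE: the pair's first component is the operand of `readOp`, whose type depends on it — only a definitional
rewrite reaches it. -/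
@[u_step] theorem Insn.bitOperand_reg (w : Width) (r : Reg) (off : BitVec (Operand.reg w r).width.bits) (imm : Bool) :
    Insn.bitOperand (.reg w r) off imm = (.reg w r, off.toNat % w.bits) := rfl

end X86

namespace UserX

/-- A word made of its own number. -/
@[u_step] theorem ofNat_toNat (x : UInt64) : UInt64.ofNat x.toNat = x := UInt64.ofNat_toNat

/-- A typed value made of its own number (a reload of a spilled 32-bit value). -/
@[u_step] theorem bv32_ofNat_toNat (v : BitVec 32) : BitVec.ofNat 32 v.toNat = v := by
  rw [BitVec.ofNat_toNat, BitVec.setWidth_eq]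
@[u_step] theorem bv16_ofNat_toNat (v : BitVec 16) : BitVec.ofNat 16 v.toNat = v := by
  rw [BitVec.ofNat_toNat, BitVec.setWidth_eq]
@[u_step] theorem bv8_ofNat_toNat (v : BitVec 8) : BitVec.ofNat 8 v.toNat = v := by
  rw [BitVec.ofNat_toNat, BitVec.setWidth_eq]

/-- The bits of a word as a number are the word as a number (a 64-bit store). -/
@[u_step] theorem toNat_toBitVec (x : UInt64) : x.toBitVec.toNat = x.toNat := UInt64.toNat_toBitVec x

end UserX

/-! ### The clause rules of `Sem.wpUser` in the stepping set

NOT in it: `wpUser_bind'`, `wpUser_tryCatch`, `wpUser_atomically` (their folded forms are, UserX/WpSimp.lean);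
`wpUser_readMem` / `wpUser_writeMem` (the loop applies `wpUser_load` / `wpUser_store`); `wpUser_env`, `wpUser_observe`,
`wpUser_read_oracleIdx`, `wpUser_update` (the loop applies `wpUser_env_intro`: `simp` must STOP at an observation —
under the binder `∀ m, Abs L m u →` it has no fact about `m`, and would go on unfolding the rest of the instruction
with the unevaluated observation in positions that types depend on, where no rewrite can reach it afterwards). -/

attribute [u_step] X86.Sem.wpUser_pure X86.Sem.wpUser_pure' X86.Sem.wpUser_read_gpr X86.Sem.wpUser_read_gprT_w8
  X86.Sem.wpUser_read_gprT_w16 X86.Sem.wpUser_read_gprT_w32 X86.Sem.wpUser_read_gprT_w64 X86.Sem.wpUser_read_gprHi8T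
  X86.Sem.wpUser_read_rip X86.Sem.wpUser_read_flags X86.Sem.wpUser_read_vec X86.Sem.wpUser_read_mxcsr
  X86.Sem.wpUser_write_gpr X86.Sem.wpUser_write_gprT_w8 X86.Sem.wpUser_write_gprT_w16 X86.Sem.wpUser_write_gprT_w32
  X86.Sem.wpUser_write_gprT_w64 X86.Sem.wpUser_write_gprHi8T X86.Sem.wpUser_write_rip X86.Sem.wpUser_write_flags
  X86.Sem.wpUser_write_mxcsr X86.Sem.wpUser_write_vecLow X86.Sem.wpUser_write_oracleIdx
  X86.Sem.wpUser_write_xstate X86.Sem.wpUser_ask X86.Sem.wpUser_raise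
  X86.Sem.wpUser_device X86.Sem.wpUser_restoreCheckpoint X86.Sem.wpUser_askμ
  X86.Sem.wpUser_require X86.Sem.wpUser_ite
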